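-- pv_equiv track=rewrite | github.com/CosilicoAI/microplex-sources | calibration/variables.py | infer_target_level
-- ===== SOURCE A (Python) =====
-- FALLBACK_ENTITIES = {
--     # Person-level
--     "age": "person",
--     "is_male": "person",
--     "employment_income": "person",
--     "is_snap_recipient": "person",
--     "is_medicaid_enrolled": "person",
--     "is_ssi_recipient": "person",
--
--     # Tax unit level
--     "agi": "tax_unit",
--     "adjusted_gross_income": "tax_unit",
--     "filing_status": "tax_unit",
--     "eitc": "tax_unit",
--     "earned_income_credit": "tax_unit",
--     "ctc": "tax_unit",
--     "child_tax_credit": "tax_unit",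
--     "tax_unit_count": "tax_unit",
--
--     # Household level
--     "household_size": "household",
--     "tenure": "household",
--     "state_fips": "household",
--     "snap_allotment": "household",
-- }
--
-- def get_entity_for_constraint_var(var_name: str) -> str:
--     """
--     Get entity for a constraint variable (not a full reference).
--
--     Used when processing stratum constraints like (age, >=, 65).
--     Falls back to static mapping.
--
--     Args:
--         var_name: Simple variable name like "age" or "state_fips"
--
--     Returns:
--         Entity type (defaults to "person" if unknown)
--     """
--     return FALLBACK_ENTITIES.get(var_name, "person")
--
-- def infer_target_level(constraints: list[tuple[str, str, str]]) -> str: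
--     """
--     Infer the most granular level needed based on constraint variables.
--
--     If any constraint uses a person-level variable, the target needs
--     person-level filtering before aggregation to household.
--
--     Args:
--         constraints: List of (variable, operator, value) tuples
--
--     Returns:
--         Most granular level: "person", "tax_unit", or "household"
--     """
--     levels = []
--     for var, _, _ in constraints:
--         entity = get_entity_for_constraint_var(var)
--         levels.append(entity)
--
--     # Return most granular level
--     if "person" in levels:
--         return "person"
--     if "tax_unit" in levels:
--         return "tax_unit"
--     return "household"
-- ===== SOURCE B (Python) =====
-- FALLBACK_ENTITIES = {
--     # Person-level
--     "age": "person",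
--     "is_male": "person",
--     "employment_income": "person",
--     "is_snap_recipient": "person",
--     "is_medicaid_enrolled": "person",
--     "is_ssi_recipient": "person",
--
--     # Tax unit level
--     "agi": "tax_unit",
--     "adjusted_gross_income": "tax_unit",
--     "filing_status": "tax_unit",
--     "eitc": "tax_unit",
--     "earned_income_credit": "tax_unit",
--     "ctc": "tax_unit",
--     "child_tax_credit": "tax_unit",
--     "tax_unit_count": "tax_unit",
--
--     # Household level
--     "household_size": "household",
--     "tenure": "household",
--     "state_fips": "household",
--     "snap_allotment": "household",
-- }
--
-- _LEVEL_OF_RANK = ("person", "tax_unit", "household")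
--
--
-- def _rank(level: str) -> int:
--     """Granularity rank: person=0 < tax_unit=1 < household=2."""
--     if level == "person":
--         return 0
--     if level == "tax_unit":
--         return 1
--     return 2
--
--
-- def infer_target_level(constraints: list[tuple[str, str, str]]) -> str:
--     # Single pass keeping the minimum granularity rank seen so far;
--     # starting at household's rank makes empty input yield "household".
--     best = 2
--     for var, _, _ in constraints:
--         r = _rank(FALLBACK_ENTITIES.get(var, "person"))
--         if r < best:
--             best = r
--     return _LEVEL_OF_RANK[best]
-- ===== Notes on version B (the rewrite author's own statement) =====
-- stated objective: simpler
-- what changed: Replaces building a levels list and scanning it twice with membership tests by a single loop that keeps a running minimum granularity rank (person=0, tax_unit=1, household=2) and maps the final rank back to its name.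
import Mathlib
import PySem

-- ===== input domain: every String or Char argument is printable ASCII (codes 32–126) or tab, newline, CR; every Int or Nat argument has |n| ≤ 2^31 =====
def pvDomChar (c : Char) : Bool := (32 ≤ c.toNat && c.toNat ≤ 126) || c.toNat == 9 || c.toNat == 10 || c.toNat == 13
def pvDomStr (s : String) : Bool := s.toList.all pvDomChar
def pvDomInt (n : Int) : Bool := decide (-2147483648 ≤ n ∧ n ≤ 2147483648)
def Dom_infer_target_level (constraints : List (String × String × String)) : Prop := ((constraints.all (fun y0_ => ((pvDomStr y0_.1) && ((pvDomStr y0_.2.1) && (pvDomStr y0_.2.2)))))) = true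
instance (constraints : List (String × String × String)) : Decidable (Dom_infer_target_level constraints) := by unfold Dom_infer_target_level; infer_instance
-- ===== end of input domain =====

-- B replaces A's levels-list plus two priority membership scans by one loop keeping a
-- running minimum granularity rank, mapped back to its level name (objective: simpler).


-- ===== PORT A =====
def FALLBACK_ENTITIES : PySem.Dict String String := PySem.Dict.ofList
  [ ("age", "person"), ("is_male", "person"), ("employment_income", "person"),
    ("is_snap_recipient", "person"), ("is_medicaid_enrolled", "person"), ("is_ssi_recipient", "person"),
    ("agi", "tax_unit"), ("adjusted_gross_income", "tax_unit"), ("filing_status", "tax_unit"),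
    ("eitc", "tax_unit"), ("earned_income_credit", "tax_unit"), ("ctc", "tax_unit"),
    ("child_tax_credit", "tax_unit"), ("tax_unit_count", "tax_unit"),
    ("household_size", "household"), ("tenure", "household"), ("state_fips", "household"),
    ("snap_allotment", "household") ]

def get_entity_for_constraint_var (var_name : String) : String :=
  FALLBACK_ENTITIES.getD var_name "person"

def infer_target_level (constraints : List (String × String × String)) : String :=
  let levels := constraints.foldl (fun acc c => acc ++ [get_entity_for_constraint_var c.1]) []
  if "person" ∈ levels then "person"
  else if "tax_unit" ∈ levels then "tax_unit"
  else "household"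

-- ===== PORT B =====
def pvRankB (level : String) : Int :=
  if level = "person" then 0
  else if level = "tax_unit" then 1
  else 2

def pvLevelOfRank : List String := ["person", "tax_unit", "household"]

def infer_target_level_alt (constraints : List (String × String × String)) : String :=
  let best := constraints.foldl (fun best c =>
    let r := pvRankB (FALLBACK_ENTITIES.getD c.1 "person")
    if r < best then r else best) 2
  -- best is always 0, 1 or 2, so the tuple index _LEVEL_OF_RANK[best] never raises
  (PySem.List.pyGet? pvLevelOfRank best).getD ""

-- ===== PRECONDITION & SPEC =====
def Spec_infer_target_level (constraints : List (String × String × String)) (out : String) : Prop := out = infer_target_level_alt constraints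
instance (constraints : List (String × String × String)) (out : String) : Decidable (Spec_infer_target_level constraints out) := by unfold Spec_infer_target_level; infer_instance

-- ===== CLAIM (what is proved, stated in full; the proofs are below) =====
def Claim_equal_infer_target_level : Prop := ∀ (constraints : List (String × String × String)), Dom_infer_target_level constraints → Spec_infer_target_level constraints (infer_target_level constraints)

-- ===== LEMMAS AND PROOFS =====

-- the entity of a constraint (proof-side abbreviation)
def pvEnt (c : String × String × String) : String := FALLBACK_ENTITIES.getD c.1 "person"

-- A's answer expressed as a rank over a list of entity names (proof-side helper)
def pvMinRank (vs : List String) : Int :=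
  if "person" ∈ vs then 0 else if "tax_unit" ∈ vs then 1 else 2

theorem pvMinRank_bounds (vs : List String) : 0 ≤ pvMinRank vs ∧ pvMinRank vs ≤ 2 := by
  unfold pvMinRank; split_ifs <;> omega

theorem pvRankB_bounds (v : String) : 0 ≤ pvRankB v ∧ pvRankB v ≤ 2 := by
  unfold pvRankB; split_ifs <;> omega

theorem pvMinRank_cons (v : String) (vs : List String) :
    pvMinRank (v :: vs) = min (pvRankB v) (pvMinRank vs) := by
  have hb := pvMinRank_bounds vs
  simp only [pvMinRank, pvRankB, List.mem_cons] at *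
  by_cases h1 : v = "person"
  · subst h1
    simp only [true_or, if_true]
    split_ifs <;> omega
  · have h1' : ¬ "person" = v := fun h => h1 h.symm
    by_cases h2 : v = "tax_unit"
    · subst h2
      simp only [h1', false_or, true_or, if_true, if_neg h1]
      split_ifs <;> omega
    · have h2' : ¬ "tax_unit" = v := fun h => h2 h.symm
      simp only [h1', h2', false_or, if_neg h1, if_neg h2]
      split_ifs <;> omega

theorem pvLevels_eq (cs : List (String × String × String)) (acc : List String) :
    cs.foldl (fun acc c => acc ++ [get_entity_for_constraint_var c.1]) acc = acc ++ cs.map pvEnt := by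
  induction cs generalizing acc with
  | nil => simp
  | cons c cs ih =>
    rw [List.foldl_cons, ih]
    simp [pvEnt, get_entity_for_constraint_var]

theorem pvFold_min (cs : List (String × String × String)) (r : Int) (h0 : 0 ≤ r) (h2 : r ≤ 2) :
    cs.foldl (fun best c =>
      let rk := pvRankB (FALLBACK_ENTITIES.getD c.1 "person")
      if rk < best then rk else best) r = min r (pvMinRank (cs.map pvEnt)) := by
  induction cs generalizing r with
  | nil =>
    simp only [List.foldl_nil, List.map_nil, pvMinRank, List.not_mem_nil, if_false]
    omega
  | cons c cs ih =>
    have hrk := pvRankB_bounds (pvEnt c)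
    have hM := pvMinRank_bounds (cs.map pvEnt)
    rw [List.map_cons, pvMinRank_cons]
    rw [List.foldl_cons]
    show cs.foldl _ (if pvRankB (pvEnt c) < r then pvRankB (pvEnt c) else r) = _
    rw [ih _ (by omega) (by omega)]
    generalize pvMinRank (cs.map pvEnt) = M at *
    generalize pvRankB (pvEnt c) = k at *
    split_ifs <;> omega

-- ===== VERDICT (by name: the statement is the Claim_ definition above) =====
theorem infer_target_level_spec : Claim_equal_infer_target_level := by
  intro cs _
  unfold Spec_infer_target_level infer_target_level infer_target_level_alt
  rw [pvLevels_eq cs [], pvFold_min cs 2 (by omega) (by omega)]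
  have hb := pvMinRank_bounds (cs.map pvEnt)
  have hmin : min (2 : Int) (pvMinRank (cs.map pvEnt)) = pvMinRank (cs.map pvEnt) := by omega
  rw [hmin]
  simp only [List.nil_append, pvMinRank]
  split_ifs <;> rfl
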